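-- pv_equiv track=rewrite | github.com/Digital-Democracy-Project/votebot | src/votebot/utils/intent.py | normalize_retrieval_sources
-- ===== SOURCE A (Python) =====
-- VALID_RETRIEVAL_SOURCES = frozenset({
--     "bill",
--     "bill-text",
--     "bill-history",
--     "bill-votes",
--     "legislator",
--     "legislator-votes",
--     "organization",
--     "training",
-- })
--
-- def normalize_retrieval_sources(raw_sources: set[str]) -> list[str]:
--     """Normalize retrieval source document types to the controlled vocabulary.
--
--     Unknown values are mapped to "unknown" and logged as warnings.
--
--     Args:
--         raw_sources: Set of document_type values from retrieval chunks.
--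
--     Returns:
--         Sorted list of normalized source types.
--     """
--     import structlog
--     logger = structlog.get_logger()
--
--     normalized = set()
--     for src in raw_sources:
--         if src in VALID_RETRIEVAL_SOURCES:
--             normalized.add(src)
--         else:
--             logger.warning("Unknown retrieval source document_type", document_type=src)
--             normalized.add("unknown")
--
--     return sorted(normalized)
-- ===== SOURCE B (Python) =====
-- _SORTED_KNOWN = (
--     "bill",
--     "bill-history",
--     "bill-text",
--     "bill-votes",
--     "legislator",
--     "legislator-votes",
--     "organization",
--     "training",
-- )
--
-- def normalize_retrieval_sources(raw_sources: set[str]) -> list[str]: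
--     """Table-driven variant (return value only; the logging side effect is
--     dropped): scan once to detect any unknown value, then build the result
--     directly in sorted order by filtering the fixed sorted vocabulary table
--     against the input; no set is built and nothing is sorted at runtime
--     ("unknown" sorts after every known value, so it is appended last)."""
--     has_unknown = False
--     for src in raw_sources:
--         if src not in _SORTED_KNOWN:
--             has_unknown = True
--
--     out = [v for v in _SORTED_KNOWN if v in raw_sources]
--     if has_unknown:
--         out.append("unknown")
--     return out
-- ===== Notes on version B (the rewrite author's own statement) =====
-- stated objective: alternative
-- what changed: Instead of accumulating a normalized set element-by-element and sorting it, B scans the input once only to set a has_unknown flag, then emits the result directly in sorted order by filtering a fixed pre-sorted vocabulary table against the input and appending 'unknown' last (it sorts after every known value); no set is built and nothing is sorted at runtime. Equivalence is about the return value: B drops A's per-unknown logger.warning side effect.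
import Mathlib
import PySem

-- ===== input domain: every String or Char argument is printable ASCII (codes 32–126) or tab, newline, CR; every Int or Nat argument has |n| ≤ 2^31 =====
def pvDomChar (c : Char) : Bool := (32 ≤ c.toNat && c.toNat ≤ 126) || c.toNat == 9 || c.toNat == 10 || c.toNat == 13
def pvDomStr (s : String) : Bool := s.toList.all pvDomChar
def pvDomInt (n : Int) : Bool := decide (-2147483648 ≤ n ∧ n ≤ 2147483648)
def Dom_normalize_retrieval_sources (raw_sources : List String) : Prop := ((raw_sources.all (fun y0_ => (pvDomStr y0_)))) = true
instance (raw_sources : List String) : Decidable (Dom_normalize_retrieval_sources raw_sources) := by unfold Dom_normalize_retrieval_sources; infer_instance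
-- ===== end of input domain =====

-- ===== PORT A =====
-- One honest line: B builds the result directly in sorted order by filtering a fixed sorted
-- vocabulary table against the input (no set built, no runtime sort), objective: alternative;
-- equivalence is about the return value (the logger.warning side effect is not modelled).
def pvValid : PySem.Set String :=
  PySem.Set.ofList ["bill", "bill-text", "bill-history", "bill-votes",
    "legislator", "legislator-votes", "organization", "training"]

def normalize_retrieval_sources (raw_sources : List String) : List String :=
  let normalized := raw_sources.foldl
    (fun s src => if pvValid.contains src then PySem.Set.add s src
                  else PySem.Set.add s "unknown") PySem.Set.empty
  PySem.List.sorted normalized (fun x => x) false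

-- ===== PORT B =====
def pvSortedKnown : List String :=
  ["bill", "bill-history", "bill-text", "bill-votes",
   "legislator", "legislator-votes", "organization", "training"]

def normalize_retrieval_sources_alt (raw_sources : List String) : List String :=
  let has_unknown := raw_sources.foldl
    (fun b src => if pvSortedKnown.contains src then b else true) false
  let out := pvSortedKnown.filter (fun v => raw_sources.contains v)
  if has_unknown then out ++ ["unknown"] else out

-- ===== PRECONDITION & SPEC =====
def Spec_normalize_retrieval_sources (raw_sources : List String) (out : List String) : Prop := out = normalize_retrieval_sources_alt raw_sources
instance (raw_sources : List String) (out : List String) : Decidable (Spec_normalize_retrieval_sources raw_sources out) := by unfold Spec_normalize_retrieval_sources; infer_instance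

-- ===== CLAIM =====
def Claim_equal_normalize_retrieval_sources : Prop := ∀ (raw_sources : List String), Dom_normalize_retrieval_sources raw_sources → Spec_normalize_retrieval_sources raw_sources (normalize_retrieval_sources raw_sources)

-- ===== LEMMAS AND PROOFS =====

theorem pv_mem_foldA (l : List String) (s0 : PySem.Set String) (h0 : s0.Nodup) (x : String) :
    x ∈ l.foldl (fun s src => if pvValid.contains src then PySem.Set.add s src
                  else PySem.Set.add s "unknown") s0 ↔
      x ∈ s0 ∨ (x ∈ l ∧ pvValid.contains x) ∨
        (x = "unknown" ∧ ∃ y ∈ l, ¬ pvValid.contains y) := by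
  induction l generalizing s0 with
  | nil => simp
  | cons a t ih =>
    simp only [List.foldl_cons]
    by_cases ha : pvValid.contains a
    · rw [if_pos ha, ih _ (PySem.Set.nodup_add _ _ h0)]
      simp only [PySem.Set.mem_add, List.mem_cons]
      constructor
      · rintro ((h | rfl) | h | h)
        · exact Or.inl h
        · exact Or.inr (Or.inl ⟨Or.inl rfl, ha⟩)
        · exact Or.inr (Or.inl ⟨Or.inr h.1, h.2⟩)
        · obtain ⟨rfl, y, hy, hny⟩ := h
          exact Or.inr (Or.inr ⟨rfl, y, Or.inr hy, hny⟩)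
      · rintro (h | ⟨(rfl | hx), hc⟩ | ⟨rfl, y, (rfl | hy), hny⟩)
        · exact Or.inl (Or.inl h)
        · exact Or.inl (Or.inr rfl)
        · exact Or.inr (Or.inl ⟨hx, hc⟩)
        · exact absurd ha hny
        · exact Or.inr (Or.inr ⟨rfl, y, hy, hny⟩)
    · rw [if_neg ha, ih _ (PySem.Set.nodup_add _ _ h0)]
      simp only [PySem.Set.mem_add, List.mem_cons]
      constructor
      · rintro ((h | rfl) | h | h)
        · exact Or.inl h
        · exact Or.inr (Or.inr ⟨rfl, a, Or.inl rfl, ha⟩)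
        · exact Or.inr (Or.inl ⟨Or.inr h.1, h.2⟩)
        · obtain ⟨rfl, y, hy, hny⟩ := h
          exact Or.inr (Or.inr ⟨rfl, y, Or.inr hy, hny⟩)
      · rintro (h | ⟨(rfl | hx), hc⟩ | ⟨rfl, y, (rfl | hy), hny⟩)
        · exact Or.inl (Or.inl h)
        · exact absurd hc ha
        · exact Or.inr (Or.inl ⟨hx, hc⟩)
        · exact Or.inl (Or.inr rfl)
        · exact Or.inr (Or.inr ⟨rfl, y, hy, hny⟩)

theorem pv_nodup_foldA (l : List String) (s0 : PySem.Set String) (h0 : s0.Nodup) :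
    (l.foldl (fun s src => if pvValid.contains src then PySem.Set.add s src
                  else PySem.Set.add s "unknown") s0).Nodup := by
  induction l generalizing s0 with
  | nil => exact h0
  | cons a t ih =>
    simp only [List.foldl_cons]
    split <;> exact ih _ (PySem.Set.nodup_add _ _ h0)

-- B's detection fold is 'b or any unknown present'
theorem pv_foldB (l : List String) (b : Bool) :
    l.foldl (fun b src => if pvSortedKnown.contains src then b else true) b =
      (b || l.any (fun s => ! pvSortedKnown.contains s)) := by
  induction l generalizing b with
  | nil => simp
  | cons a t ih =>
    simp only [List.foldl_cons, List.any_cons]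
    by_cases ha : a ∈ pvSortedKnown
    · rw [if_pos (by simpa using ha), ih]
      simp [ha]
    · rw [if_neg (by simpa using ha), ih]
      simp [ha]

theorem pv_contains_eq (x : String) : pvValid.contains x = pvSortedKnown.contains x := by
  have h : x ∈ pvValid ↔ x ∈ pvSortedKnown := by
    unfold pvValid pvSortedKnown
    simp [PySem.Set.mem_ofList]
    tauto
  rw [Bool.eq_iff_iff]
  constructor
  · intro hc
    exact List.contains_iff_mem.2 (h.1 ((PySem.Set.contains_iff _ _).1 hc))
  · intro hc
    exact (PySem.Set.contains_iff _ _).2 (h.2 (List.contains_iff_mem.1 hc))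

theorem pv_B_pairwise (raw : List String) :
    (normalize_retrieval_sources_alt raw).Pairwise (fun a b => a < b) := by
  have hvoc : pvSortedKnown.Pairwise (fun a b : String => a < b) := by
    unfold pvSortedKnown
    simp only [String.lt_iff_toList_lt]
    decide
  have hfil := hvoc.filter (fun v => raw.contains v)
  simp only [normalize_retrieval_sources_alt]
  split
  · rw [List.pairwise_append]
    refine ⟨hfil, List.pairwise_singleton _ _, ?_⟩
    intro a ha b hb
    rw [List.mem_filter] at ha
    rw [List.mem_singleton] at hb
    subst hb
    have hm : a ∈ pvSortedKnown := ha.1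
    fin_cases hm <;> (rw [String.lt_iff_toList_lt]; decide)
  · exact hfil

theorem pv_B_nodup (raw : List String) : (normalize_retrieval_sources_alt raw).Nodup := by
  exact (pv_B_pairwise raw).imp (fun h => ne_of_lt h)

theorem pv_mem_B (raw : List String) (x : String) :
    x ∈ normalize_retrieval_sources_alt raw ↔
      (x ∈ raw ∧ pvValid.contains x) ∨
        (x = "unknown" ∧ ∃ y ∈ raw, ¬ pvValid.contains y) := by
  simp only [normalize_retrieval_sources_alt, pv_foldB, Bool.false_or]
  have hne : ("unknown" : String) ∉ pvSortedKnown := by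
    unfold pvSortedKnown; decide
  by_cases hu : raw.any (fun s => ! pvSortedKnown.contains s) = true
  · rw [if_pos hu, List.mem_append, List.mem_filter, List.mem_singleton]
    rw [List.any_eq_true] at hu
    obtain ⟨y, hy, hny⟩ := hu
    rw [Bool.not_eq_eq_eq_not, Bool.not_true] at hny
    constructor
    · rintro (⟨hv, hc⟩ | rfl)
      · exact Or.inl ⟨by simpa using hc,
          by rw [pv_contains_eq]; simpa using hv⟩
      · refine Or.inr ⟨rfl, y, hy, ?_⟩
        rw [pv_contains_eq, hny]
        exact Bool.false_ne_true
    · rintro (⟨hr, hc⟩ | ⟨rfl, _⟩)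
      · rw [pv_contains_eq] at hc
        exact Or.inl ⟨by simpa using hc, by simpa using hr⟩
      · exact Or.inr rfl
  · rw [if_neg hu, List.mem_filter]
    rw [List.any_eq_true] at hu
    push Not at hu
    constructor
    · rintro ⟨hv, hc⟩
      exact Or.inl ⟨by simpa using hc,
        by rw [pv_contains_eq]; simpa using hv⟩
    · rintro (⟨hr, hc⟩ | ⟨rfl, y, hy, hny⟩)
      · rw [pv_contains_eq] at hc
        exact ⟨by simpa using hc, by simpa using hr⟩
      · exfalso
        apply hny
        have := hu y hy
        rw [pv_contains_eq]
        simpa using this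

-- ===== VERDICT =====
theorem normalize_retrieval_sources_spec : Claim_equal_normalize_retrieval_sources := by
  intro raw _
  unfold Spec_normalize_retrieval_sources
  simp only [normalize_retrieval_sources]
  rw [show (PySem.Set.empty : PySem.Set String) = [] from rfl]
  refine PySem.List.sorted_eq_of_perm_of_pairwise_lt _ _ (fun x : String => x) ?_ ?_
  · rw [List.perm_ext_iff_of_nodup (pv_B_nodup raw) (pv_nodup_foldA raw [] List.nodup_nil)]
    intro x
    rw [pv_mem_B, pv_mem_foldA raw [] List.nodup_nil]
    simp
  · exact pv_B_pairwise raw
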